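-- pv_equiv track=rewrite | github.com/songShiPeng/pa | sklearn/main.py | ownGroupDirectionCount
-- ===== SOURCE A (Python) =====
-- lowDirection = 30
--
-- def ownGroupDirectionCount(*arrs):
--     re = 0
--     pre = -100
--     for value in arrs[0]:
--         if(value < 0):
--             continue
--         if(pre == -100):
--             pre = value
--             continue
--         if(abs(value - pre) > lowDirection):
--             re = re + 1
--     return re
-- ===== SOURCE B (Python) =====
-- lowDirection = 30
--
-- def ownGroupDirectionCount(*arrs):
--     values = arrs[0]
--     # pass 1: the fixed reference is the first non-negative value
--     pre = None
--     for v in values: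
--         if v >= 0:
--             pre = v
--             break
--     if pre is None:
--         return 0
--     # pass 2: frequency table of all non-negative values
--     freq = {}
--     for v in values:
--         if v >= 0:
--             freq[v] = freq.get(v, 0) + 1
--     # pass 3: add up the multiplicities of the distinct values outside the window;
--     # the reference itself has distance 0, so its entry never contributes
--     total = 0
--     for val, cnt in freq.items():
--         if abs(val - pre) > lowDirection:
--             total += cnt
--     return total
-- ===== Notes on version B (the rewrite author's own statement) =====
-- stated objective: alternative
-- what changed: Replaces A's single sentinel-driven pass mutating (re, pre) by three staged passes: a break-scan for the first non-negative reference, a frequency table (dict) of the non-negative values built once, and a sum of multiplicities over the table's distinct keys outside the threshold window.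
import Mathlib
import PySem

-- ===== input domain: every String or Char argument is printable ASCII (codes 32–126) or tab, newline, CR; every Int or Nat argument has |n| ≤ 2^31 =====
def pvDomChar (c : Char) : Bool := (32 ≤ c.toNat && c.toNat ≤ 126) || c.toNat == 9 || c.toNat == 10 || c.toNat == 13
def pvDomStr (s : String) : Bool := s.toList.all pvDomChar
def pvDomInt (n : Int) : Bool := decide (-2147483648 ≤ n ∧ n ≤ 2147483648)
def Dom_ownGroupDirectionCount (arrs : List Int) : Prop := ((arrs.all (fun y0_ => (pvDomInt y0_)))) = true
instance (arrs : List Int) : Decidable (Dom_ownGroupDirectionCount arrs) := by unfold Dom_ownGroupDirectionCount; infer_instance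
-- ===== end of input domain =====

-- B replaces A's sentinel-driven single pass mutating (re, pre) by three staged passes:
-- a break-scan for the first non-negative reference, a frequency table (dict) of the
-- non-negative values built once, and a sum of the multiplicities of the distinct
-- values outside the threshold window.

-- ===== PORT A =====
-- the loop over arrs[0] with state (re, pre), branches in A's order
def ownGroupDirectionCountLoop : List Int → Int → Int → Int
  | [], re, _ => re
  | value :: rest, re, pre =>
    if value < 0 then ownGroupDirectionCountLoop rest re pre
    else if pre = -100 then ownGroupDirectionCountLoop rest re value
    else if |value - pre| > 30 then ownGroupDirectionCountLoop rest (re + 1) pre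
    else ownGroupDirectionCountLoop rest re pre

def ownGroupDirectionCount (arrs : List Int) : Int :=
  ownGroupDirectionCountLoop arrs 0 (-100)

-- ===== PORT B =====
-- pass 1 of Source B: 'for v in values: if v >= 0: pre = v; break' (none = no non-negative value)
def altFindPre : List Int → Option Int
  | [] => none
  | v :: rest => if 0 ≤ v then some v else altFindPre rest

def ownGroupDirectionCount_alt (arrs : List Int) : Int :=
  match altFindPre arrs with
  | none => 0
  | some pre =>
    -- pass 2: freq[v] = freq.get(v, 0) + 1 over the non-negative values
    let freq := arrs.foldl
      (fun d v => if 0 ≤ v then d.insert v (d.getD v 0 + 1) else d) PySem.Dict.empty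
    -- pass 3: for val, cnt in freq.items(): if abs(val - pre) > 30: total += cnt
    freq.items.foldl (fun total p => if |p.1 - pre| > 30 then total + p.2 else total) 0

-- ===== PRECONDITION & SPEC =====
def Spec_ownGroupDirectionCount (arrs : List Int) (out : Int) : Prop := out = ownGroupDirectionCount_alt arrs
instance (arrs : List Int) (out : Int) : Decidable (Spec_ownGroupDirectionCount arrs out) := by unfold Spec_ownGroupDirectionCount; infer_instance

-- ===== CLAIM =====
def Claim_equal_ownGroupDirectionCount : Prop := ∀ (arrs : List Int), Dom_ownGroupDirectionCount arrs → Spec_ownGroupDirectionCount arrs (ownGroupDirectionCount arrs)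

-- ===== LEMMAS AND PROOFS =====

-- A's loop, once pre is a fixed non-negative reference, adds the count over the rest
theorem loopA_fixed (xs : List Int) (re pre : Int) (hpre : 0 ≤ pre) :
    ownGroupDirectionCountLoop xs re pre =
      re + ((xs.filter (fun v => 0 ≤ v)).countP (fun v => |v - pre| > 30) : Int) := by
  induction xs generalizing re with
  | nil => simp [ownGroupDirectionCountLoop]
  | cons v rest ih =>
    have hne : pre ≠ -100 := by omega
    by_cases hv : v < 0
    · simp [ownGroupDirectionCountLoop, hv, show ¬ (0 ≤ v) by omega, ih]
    · by_cases habs : |v - pre| > 30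
      · simp [ownGroupDirectionCountLoop, hv, hne, habs,
          show (0 : Int) ≤ v by omega, ih]
        omega
      · simp [ownGroupDirectionCountLoop, hv, hne, habs,
          show (0 : Int) ≤ v by omega, ih]

-- A's sentinel phase skips negatives and fixes the first non-negative value
theorem loopA_eq (xs : List Int) :
    ownGroupDirectionCountLoop xs 0 (-100) =
      match altFindPre xs with
      | none => 0
      | some pre => ((xs.filter (fun v => 0 ≤ v)).countP (fun v => |v - pre| > 30) : Int) := by
  induction xs with
  | nil => simp [ownGroupDirectionCountLoop, altFindPre]
  | cons v rest ih =>
    by_cases hv : v < 0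
    · simpa [ownGroupDirectionCountLoop, altFindPre, hv, show ¬ (0 ≤ v) by omega] using ih
    · have h0 : (0 : Int) ≤ v := by omega
      rw [show ownGroupDirectionCountLoop (v :: rest) 0 (-100) = ownGroupDirectionCountLoop rest 0 v
            from by simp [ownGroupDirectionCountLoop, hv]]
      rw [loopA_fixed rest 0 v h0]
      simp [altFindPre, h0]

-- B's pass-3 fold over (k, c k) pairs sums the guarded multiplicities
theorem foldB_sum (P : Int → Bool) (c : Int → Int) (ks : List Int) (t : Int) :
    ks.foldl (fun (total : Int) k => if P k then total + c k else total) t =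
      t + ((ks.filter P).map c).sum := by
  induction ks generalizing t with
  | nil => simp
  | cons k rest ih =>
    by_cases hk : P k
    · simp [hk, ih]; ring
    · simp [hk, ih]

-- the distinct non-negative values, PySem order vs Mathlib dedup order, are a permutation
theorem ofList_perm_dedup (xs : List Int) : (PySem.Set.ofList xs).Perm xs.dedup := by
  apply List.perm_of_nodup_nodup_toFinset_eq
  · rw [← PySem.List.dedup_eq_ofList]; exact PySem.List.nodup_dedup xs
  · exact xs.nodup_dedup
  · ext a; simp [PySem.Set.mem_ofList]

-- summing multiplicities over the distinct values = counting in the list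
theorem sum_counts (P : Int → Bool) (ys : List Int) :
    (((PySem.Set.ofList ys).filter P).map (fun k => ((ys.count k : Nat) : Int))).sum =
      (ys.countP P : Int) := by
  have hperm : (((PySem.Set.ofList ys).filter P).map (fun k => ((ys.count k : Nat) : Int))).Perm
      ((ys.dedup.filter P).map (fun k => ((ys.count k : Nat) : Int))) :=
    ((ofList_perm_dedup ys).filter P).map _
  rw [hperm.sum_eq]
  rw [show ((ys.dedup.filter P).map (fun k => ((ys.count k : Nat) : Int))).sum
        = (((ys.dedup.filter P).map (fun k => ys.count k)).sum : Nat) from by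
      rw [Nat.cast_list_sum, List.map_map]; rfl]
  rw [List.sum_map_count_dedup_filter_eq_countP]

-- ===== VERDICT =====
theorem ownGroupDirectionCount_spec : Claim_equal_ownGroupDirectionCount := by
  intro arrs _
  unfold Spec_ownGroupDirectionCount ownGroupDirectionCount ownGroupDirectionCount_alt
  rw [loopA_eq]
  cases h : altFindPre arrs with
  | none => simp
  | some pre =>
    simp only []
    rw [show arrs.foldl (fun d v => if 0 ≤ v then d.insert v (d.getD v 0 + 1) else d)
          PySem.Dict.empty
        = PySem.Dict.counter (arrs.filter (fun v => 0 ≤ v)) from by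
      rw [← PySem.Dict.foldl_insert_getD_add_one_eq_counter, List.foldl_filter]
      simp]
    rw [PySem.Dict.items_counter]
    rw [List.foldl_map]
    rw [show (fun (total : Int) k => if |k - pre| > 30 then total + ((arrs.filter (fun v => 0 ≤ v)).count k : Int) else total)
        = (fun (total : Int) k => if (fun k => decide (|k - pre| > 30)) k then total + (fun k => (((arrs.filter (fun v => 0 ≤ v)).count k : Nat) : Int)) k else total) from by
      funext t k; simp]
    rw [foldB_sum]
    rw [sum_counts]
    simp
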